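-- pv_equiv track=rewrite | github.com/pot1223/pythonAlgorithmInterview | 11장/상위 K 빈도 요소.py | overkFeature
-- ===== SOURCE A (Python) =====
-- def overkFeature(lst : list, k : int):
--   dic = {}
--   for num in lst:
--     if num not in dic:
--       count =1
--       dic[num] = count
--     else:
--       dic[num] += 1
--   return [ n for n in dic if dic[n]>=k]
-- ===== SOURCE B (Python) =====
-- def overkFeature(lst: list, k: int):
--     # rescan-based: keep each element at its first occurrence if it appears >= k times
--     return [n for i, n in enumerate(lst) if lst.index(n) == i and lst.count(n) >= k]
-- ===== Notes on version B (the rewrite author's own statement) =====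
-- stated objective: alternative
-- what changed: Replaced the frequency-dict build-then-filter with a single comprehension that rescans the list per element (lst.index(n)==i dedupes to first occurrences, lst.count(n)>=k selects), keeping exactly the same first-occurrence order.
import Mathlib
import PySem

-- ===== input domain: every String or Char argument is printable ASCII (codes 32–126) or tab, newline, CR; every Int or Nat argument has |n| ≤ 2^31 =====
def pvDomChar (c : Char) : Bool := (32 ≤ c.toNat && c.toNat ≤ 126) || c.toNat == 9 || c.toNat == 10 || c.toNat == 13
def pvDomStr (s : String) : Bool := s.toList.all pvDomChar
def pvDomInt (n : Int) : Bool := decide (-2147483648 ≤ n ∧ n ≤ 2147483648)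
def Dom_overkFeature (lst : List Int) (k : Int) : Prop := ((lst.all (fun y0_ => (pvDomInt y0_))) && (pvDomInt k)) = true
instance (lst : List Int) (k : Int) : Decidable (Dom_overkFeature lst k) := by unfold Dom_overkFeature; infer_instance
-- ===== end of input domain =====

-- B rescans the list per element instead of building a frequency dict: alternative decomposition, same outputs.

-- ===== PORT A =====
def overkFeature (lst : List Int) (k : Int) : List Int :=
  let dic : PySem.Dict Int Int :=
    lst.foldl (fun dic num =>
      if ¬ dic.contains num then dic.insert num 1
      else dic.modify num 0 (· + 1)) PySem.Dict.empty
  dic.keys.filter (fun n => decide (dic.getD n 0 ≥ k))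

-- ===== PORT B =====
def overkFeature_alt (lst : List Int) (k : Int) : List Int :=
  ((PySem.List.enumerate lst).filter (fun p =>
      ((PySem.List.index? lst p.2).map (fun j => (j : Int)) == some p.1)
        && decide ((PySem.List.count lst p.2 : Int) ≥ k))).map (·.2)

-- ===== PRECONDITION & SPEC =====
def Spec_overkFeature (lst : List Int) (k : Int) (out : List Int) : Prop := out = overkFeature_alt lst k
instance (lst : List Int) (k : Int) (out : List Int) : Decidable (Spec_overkFeature lst k out) := by unfold Spec_overkFeature; infer_instance

-- ===== CLAIM (what is proved, stated in full; the proofs are below) =====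
def Claim_equal_overkFeature : Prop := ∀ (lst : List Int) (k : Int), Dom_overkFeature lst k → Spec_overkFeature lst k (overkFeature lst k)

-- ===== LEMMAS AND PROOFS =====
theorem fold_eq_counter (lst : List Int) :
    lst.foldl (fun (dic : PySem.Dict Int Int) num =>
      if ¬ dic.contains num then dic.insert num 1
      else dic.modify num 0 (· + 1)) PySem.Dict.empty = PySem.Dict.counter lst := by
  rw [PySem.Dict.counter_eq_foldl]
  congr 1
  funext d num
  by_cases h : d.contains num
  · simp [h]
  · simp only [Bool.not_eq_true] at h
    simp [h, PySem.Dict.modify, PySem.Dict.getD_of_not_contains (h := h)]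

theorem firstocc_eq_ofList (lst : List Int) :
    ((PySem.List.enumerate lst).filter (fun p =>
        ((PySem.List.index? lst p.2).map (fun j => (j : Int)) == some p.1))).map (·.2)
      = PySem.Set.ofList lst := by
  induction lst using List.reverseRecOn with
  | nil => simp [PySem.List.enumerate, PySem.Set.ofList]
  | append_singleton xs x ih =>
    rw [PySem.List.enumerate_append, List.filter_append, List.map_append]
    have h1 : (PySem.List.enumerate xs 0).filter (fun p =>
        ((PySem.List.index? (xs ++ [x]) p.2).map (fun j => (j : Int)) == some p.1))
        = (PySem.List.enumerate xs 0).filter (fun p =>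
        ((PySem.List.index? xs p.2).map (fun j => (j : Int)) == some p.1)) := by
      apply List.filter_congr
      intro p hp
      rw [PySem.List.mem_enumerate_iff] at hp
      obtain ⟨j, hj, rfl⟩ := hp
      rw [PySem.List.index?_append_of_mem (t := [x]) (h := by exact List.getElem_mem hj)]
    rw [h1, ih]
    rw [show PySem.List.enumerate [x] ((0:Int) + xs.length) = [(((0:Int)+xs.length), x)] from by
      simp [PySem.List.enumerate_cons, PySem.List.enumerate_nil]]
    by_cases hx : x ∈ xs
    · rw [List.filter_cons]
      rw [PySem.List.index?_append_of_mem (t := [x]) (h := hx)]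
      obtain ⟨j, hjeq⟩ := Option.isSome_iff_exists.1 ((PySem.List.index?_isSome_iff (xs := xs) (v := x)).2 hx)
      obtain ⟨hk, _, _⟩ := PySem.List.getElem_of_index?_eq_some hjeq
      simp only [hjeq, List.filter_nil]
      rw [if_neg (by simp; omega)]
      have : PySem.Set.ofList (xs ++ [x]) = PySem.Set.ofList xs := by
        rw [PySem.Set.ofList_append]
        simp [PySem.Set.update, PySem.Set.add, PySem.Set.contains, hx, PySem.Set.mem_ofList]
      simp [this]
    · rw [List.filter_cons]
      rw [PySem.List.index?_append_singleton_self (h := hx)]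
      rw [if_pos (by simp)]
      have : PySem.Set.ofList (xs ++ [x]) = PySem.Set.ofList xs ++ [x] := by
        rw [PySem.Set.ofList_append]
        simp [PySem.Set.update, PySem.Set.add, PySem.Set.contains, hx, PySem.Set.mem_ofList]
      simp [this]


theorem map_snd_filter_snd (q : Int → Bool) (l : List (Int × Int)) :
    (l.filter (fun p => q p.2)).map (·.2) = (l.map (·.2)).filter q := by
  induction l with
  | nil => rfl
  | cons p t ih => by_cases h : q p.2 <;> simp [h, ih]

-- ===== VERDICT (by name: the statement is the Claim_ definition above) =====
theorem overkFeature_spec : Claim_equal_overkFeature := by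
  intro lst k _
  unfold Spec_overkFeature overkFeature overkFeature_alt
  rw [fold_eq_counter]
  rw [← List.filter_filter, List.filter_comm, map_snd_filter_snd (fun n => decide ((PySem.List.count lst n : Int) ≥ k)), firstocc_eq_ofList]
  simp only [PySem.Dict.keys_counter, PySem.Dict.getD_counter, PySem.List.count_eq]
  rfl
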